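-- pv_equiv track=rewrite | github.com/StarsMmd/Blender-Addon-Gamecube-Models | phases/describe/meshes.py | _validate_mesh
-- ===== SOURCE A (Python) =====
-- def _validate_mesh(face_lists, faces):
--     """Remove faces with repeated vertices (degenerate tri-strip artifacts)."""
--     pruned_faces = []
--     pruned_face_lists = [[] for _ in range(len(face_lists))]
--     for face_id, face in enumerate(faces):
--         if len(face) == len(set(face)):
--             pruned_faces.append(face)
--             for i in range(len(face_lists)):
--                 if face_id < len(face_lists[i]):
--                     pruned_face_lists[i].append(face_lists[i][face_id])
--     return pruned_face_lists, pruned_faces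
-- ===== SOURCE B (Python) =====
-- def _validate_mesh(face_lists, faces):
--     """Remove faces with repeated vertices (degenerate tri-strip artifacts)."""
--     # Filter by deletion: start from full copies (each parallel list truncated to
--     # the face range), then walk the face indices backwards and delete the slots
--     # of degenerate faces in place; reverse order keeps lower indices stable.
--     pruned_faces = list(faces)
--     pruned_face_lists = [fl[:len(faces)] for fl in face_lists]
--     for fid in range(len(faces) - 1, -1, -1):
--         face = faces[fid]
--         if len(face) != len(set(face)):
--             del pruned_faces[fid]
--             for pl in pruned_face_lists:
--                 if fid < len(pl):
--                     del pl[fid]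
--     return pruned_face_lists, pruned_faces
-- ===== Notes on version B (the rewrite author's own statement) =====
-- stated objective: alternative
-- what changed: B computes the complement: it copies the inputs (each parallel list truncated to the face range) and walks the face indices backwards, deleting the slots of degenerate faces in place, instead of A's forward loop that appends survivors to fresh lists.
import Mathlib
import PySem

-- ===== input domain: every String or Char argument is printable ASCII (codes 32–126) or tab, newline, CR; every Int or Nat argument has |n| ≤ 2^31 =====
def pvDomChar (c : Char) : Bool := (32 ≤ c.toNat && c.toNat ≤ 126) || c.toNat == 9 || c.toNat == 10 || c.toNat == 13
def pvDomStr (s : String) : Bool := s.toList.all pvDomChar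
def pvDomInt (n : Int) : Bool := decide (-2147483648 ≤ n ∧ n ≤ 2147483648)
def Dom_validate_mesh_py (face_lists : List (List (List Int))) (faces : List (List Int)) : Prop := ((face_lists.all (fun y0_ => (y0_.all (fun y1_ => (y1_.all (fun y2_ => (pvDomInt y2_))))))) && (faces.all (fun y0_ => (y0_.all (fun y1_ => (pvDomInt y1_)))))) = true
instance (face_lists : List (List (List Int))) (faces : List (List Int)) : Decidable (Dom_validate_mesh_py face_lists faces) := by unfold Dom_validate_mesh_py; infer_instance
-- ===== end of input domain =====

-- B filters by deletion: copy the inputs, walk face indices backwards and delete degenerate slots in place (alternative algorithm; same cost). Return value only; neither program mutates its arguments.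


-- ===== PORT A =====
-- shared helper: Python's 'len(face) == len(set(face))'
def vmValid (face : List Int) : Bool := face.length == (PySem.Set.ofList face).length

-- literal transliteration of A: one loop over enumerate(faces); on a valid face append the
-- face and, for each parallel list with a long-enough prefix, its entry at face_id.
def validate_mesh_py (face_lists : List (List (List Int))) (faces : List (List Int)) : List (List (List Int)) × List (List Int) :=
  (PySem.List.enumerate faces 0).foldl
    (fun st p =>
      if vmValid p.2 then
        ((st.1.zip face_lists).map (fun q =>
            if p.1 < (q.2.length : Int) then q.1 ++ [PySem.List.pyGetD q.2 p.1 []] else q.1),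
         st.2 ++ [p.2])
      else st)
    (face_lists.map (fun _ => ([] : List (List Int))), ([] : List (List Int)))

-- ===== PORT B =====
-- literal transliteration of B: copies (each parallel list sliced to the face range),
-- then a countdown loop over range(len(faces)-1, -1, -1) deleting degenerate slots.
def validate_mesh_py_alt (face_lists : List (List (List Int))) (faces : List (List Int)) : List (List (List Int)) × List (List Int) :=
  let pruned_faces := faces
  let pruned_face_lists := face_lists.map (fun fl => PySem.List.slice fl none (some (faces.length : Int)))
  (PySem.List.pyRange ((faces.length : Int) - 1) (-1) (-1)).foldl
    (fun st fid =>
      let face := PySem.List.pyGetD faces fid []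
      if face.length != (PySem.Set.ofList face).length then
        (st.1.map (fun pl => if fid < (pl.length : Int) then pl.eraseIdx fid.toNat else pl),
         st.2.eraseIdx fid.toNat)
      else st)
    (pruned_face_lists, pruned_faces)

-- ===== PRECONDITION & SPEC =====
def Spec_validate_mesh_py (face_lists : List (List (List Int))) (faces : List (List Int)) (out : List (List (List Int)) × List (List Int)) : Prop := out = validate_mesh_py_alt face_lists faces
instance (face_lists : List (List (List Int))) (faces : List (List Int)) (out : List (List (List Int)) × List (List Int)) : Decidable (Spec_validate_mesh_py face_lists faces out) := by unfold Spec_validate_mesh_py; infer_instance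

-- ===== CLAIM (what is proved, stated in full; the proofs are below) =====
def Claim_equal_validate_mesh_py : Prop := ∀ (face_lists : List (List (List Int))) (faces : List (List Int)), Dom_validate_mesh_py face_lists faces → Spec_validate_mesh_py face_lists faces (validate_mesh_py face_lists faces)

-- ===== LEMMAS AND PROOFS =====

-- ---- A-side closed form ----
-- contribution of faces (indexed from k) to the pruned parallel list built from fl
def vmContrib (fs : List (List Int)) (k : Int) (fl : List (List Int)) : List (List Int) :=
  (((((PySem.List.enumerate fs k).filter (fun p => vmValid p.2)).map Prod.fst).filter
      (fun fid => fid < (fl.length : Int))).map (fun fid => PySem.List.pyGetD fl fid []))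

def vmFaces (fs : List (List Int)) (k : Int) : List (List Int) :=
  ((PySem.List.enumerate fs k).filter (fun p => vmValid p.2)).map Prod.snd

theorem vmContrib_cons_valid (f : List Int) (fs : List (List Int)) (k : Int) (fl : List (List Int))
    (h : vmValid f = true) :
    vmContrib (f :: fs) k fl
      = (if k < (fl.length : Int) then [PySem.List.pyGetD fl k []] else []) ++ vmContrib fs (k + 1) fl := by
  simp only [vmContrib, PySem.List.enumerate_cons, List.filter_cons, h]
  by_cases hk : k < (fl.length : Int) <;> simp [hk]

theorem vmContrib_cons_invalid (f : List Int) (fs : List (List Int)) (k : Int) (fl : List (List Int))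
    (h : ¬ vmValid f = true) :
    vmContrib (f :: fs) k fl = vmContrib fs (k + 1) fl := by
  simp [vmContrib, PySem.List.enumerate_cons, h]

theorem vmFaces_cons_valid (f : List Int) (fs : List (List Int)) (k : Int)
    (h : vmValid f = true) : vmFaces (f :: fs) k = f :: vmFaces fs (k + 1) := by
  simp [vmFaces, PySem.List.enumerate_cons, h]

theorem vmFaces_cons_invalid (f : List Int) (fs : List (List Int)) (k : Int)
    (h : ¬ vmValid f = true) : vmFaces (f :: fs) k = vmFaces fs (k + 1) := by
  simp [vmFaces, PySem.List.enumerate_cons, h]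

theorem vmFoldl (face_lists : List (List (List Int))) (fs : List (List Int)) :
    ∀ (k : Int) (acc1 : List (List (List Int))) (acc2 : List (List Int)),
      acc1.length = face_lists.length →
      (PySem.List.enumerate fs k).foldl
        (fun st p =>
          if vmValid p.2 then
            ((st.1.zip face_lists).map (fun q =>
                if p.1 < (q.2.length : Int) then q.1 ++ [PySem.List.pyGetD q.2 p.1 []] else q.1),
             st.2 ++ [p.2])
          else st)
        (acc1, acc2)
      = ((acc1.zip face_lists).map (fun q => q.1 ++ vmContrib fs k q.2), acc2 ++ vmFaces fs k) := by
  induction fs with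
  | nil =>
      intro k acc1 acc2 hlen
      simp [vmContrib, vmFaces, PySem.List.enumerate_nil]
      exact (List.map_fst_zip (le_of_eq hlen)).symm
  | cons f fs ih =>
      intro k acc1 acc2 hlen
      rw [PySem.List.enumerate_cons, List.foldl_cons]
      by_cases hv : vmValid f = true
      · rw [if_pos hv, ih (k + 1) _ _ (by simp [hlen])]
        simp only [Prod.mk.injEq]
        refine ⟨?_, ?_⟩
        · apply List.ext_getElem
          · simp
          · intro i h1 h2
            have hi2 : i < face_lists.length := by
              simp only [List.length_map, List.length_zip] at h2; omega
            simp only [List.getElem_map, List.getElem_zip]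
            rw [vmContrib_cons_valid _ _ _ _ hv]
            by_cases hk : k < ((face_lists[i]'hi2).length : Int) <;>
              simp [hk, List.append_assoc]
        · rw [vmFaces_cons_valid _ _ _ hv]
          simp
      · rw [if_neg hv, ih (k + 1) _ _ hlen]
        simp only [Prod.mk.injEq]
        refine ⟨?_, ?_⟩
        · apply List.map_congr_left
          intro q _
          rw [vmContrib_cons_invalid _ _ _ _ hv]
        · rw [vmFaces_cons_invalid _ _ _ hv]

-- ---- B-side machinery ----
-- canonical "kept" form: surviving entries of a prefix ys, validity read off faces
def vmKeep (faces : List (List Int)) (ys : List (List Int)) : List (List Int) :=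
  ((List.range ys.length).filter (fun i : Nat => vmValid (PySem.List.pyGetD faces (i : Int) []))).map
    (fun i : Nat => ys.getD i [])

-- the per-list deletion step of B (validity check pushed inside the map)
def vmStep (faces : List (List Int)) (pl : List (List Int)) (fid : Int) : List (List Int) :=
  if (PySem.List.pyGetD faces fid []).length != (PySem.Set.ofList (PySem.List.pyGetD faces fid [])).length then
    (if fid < (pl.length : Int) then pl.eraseIdx fid.toNat else pl)
  else pl

theorem vmKeep_snoc (faces : List (List Int)) (ys : List (List Int)) (y : List Int) :
    vmKeep faces (ys ++ [y])
      = vmKeep faces ys ++ (if vmValid (PySem.List.pyGetD faces (ys.length : Int) []) then [y] else []) := by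
  have hl : (ys ++ [y]).length = ys.length + 1 := by simp
  simp only [vmKeep, hl]
  rw [List.range_succ, List.filter_append, List.map_append]
  congr 1
  · apply List.map_congr_left
    intro i hi
    have hi' : i < ys.length := List.mem_range.mp (List.mem_of_mem_filter hi)
    simp [List.getD_eq_getElem?_getD, List.getElem?_append_left hi']
  · by_cases hv : vmValid (faces[ys.length]?.getD []) = true
    · simp [hv, PySem.List.pyGetD_natCast, List.getD_eq_getElem?_getD]
    · simp [hv, PySem.List.pyGetD_natCast, List.getD_eq_getElem?_getD]

-- the port's '!=' test is the negation of vmValid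
theorem vmStep_eq (faces : List (List Int)) (pl : List (List Int)) (fid : Int) :
    vmStep faces pl fid
      = if vmValid (PySem.List.pyGetD faces fid []) then pl
        else (if fid < (pl.length : Int) then pl.eraseIdx fid.toNat else pl) := by
  simp only [vmStep, vmValid, bne]
  by_cases hb : ((PySem.List.pyGetD faces fid []).length == (PySem.Set.ofList (PySem.List.pyGetD faces fid [])).length) = true
  · simp [hb]
  · simp only [Bool.not_eq_true] at hb
    simp [hb]

-- deleting at the junction of a known-length prefix
theorem vmEraseMid {α : Type} (l1 l2 : List α) (a : α) :
    (l1 ++ a :: l2).eraseIdx l1.length = l1 ++ l2 := by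
  induction l1 with
  | nil => simp
  | cons x l ih => simp [ih]

-- core countdown lemma for one parallel list
theorem vmStep_foldl (faces : List (List Int)) (xs : List (List Int)) :
    ∀ (n : Nat), n ≤ faces.length → ∀ (T : List (List Int)), (xs.length < n → T = []) →
      (PySem.List.pyRange ((n : Int) - 1) (-1) (-1)).foldl (vmStep faces) (xs.take n ++ T)
        = vmKeep faces (xs.take n) ++ T := by
  intro n
  induction n with
  | zero =>
      intro _ T _
      rw [PySem.List.pyRange_neg_one_eq_nil (by omega)]
      simp [vmKeep]
  | succ n ih =>
      intro hn T hT
      have hn' : n ≤ faces.length := by omega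
      have hcast : ((n + 1 : Nat) : Int) - 1 = (n : Int) := by push_cast; ring
      rw [hcast, PySem.List.pyRange_neg_one_cons (by omega), List.foldl_cons, vmStep_eq]
      by_cases hlt : n < xs.length
      · have hlen_take : (xs.take n).length = n := by
          rw [List.length_take]; omega
        have htk : xs.take (n + 1) ++ T = xs.take n ++ (xs[n] :: T) := by
          rw [List.take_succ_eq_append_getElem hlt, List.append_assoc, List.singleton_append]
        have hkeep : vmKeep faces (xs.take (n + 1))
            = vmKeep faces (xs.take n)
              ++ (if vmValid (PySem.List.pyGetD faces ((xs.take n).length : Int) []) then [xs[n]] else []) := by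
          rw [List.take_succ_eq_append_getElem hlt, vmKeep_snoc]
        rw [htk, hkeep, hlen_take]
        by_cases hv : vmValid (PySem.List.pyGetD faces (n : Int) []) = true
        · rw [if_pos hv, if_pos hv,
             ih hn' (xs[n] :: T) (fun h => absurd h (by omega))]
          simp [List.append_assoc]
        · rw [if_neg hv, if_neg hv]
          have hguard : (n : Int) < (((xs.take n) ++ (xs[n] :: T)).length : Int) := by
            simp only [List.length_append, hlen_take, List.length_cons]
            push_cast; omega
          rw [if_pos hguard]
          have herase : ((xs.take n) ++ (xs[n] :: T)).eraseIdx (n : Int).toNat = xs.take n ++ T := by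
            rw [Int.toNat_natCast]
            have h := vmEraseMid (xs.take n) T (xs[n])
            rwa [hlen_take] at h
          rw [herase, ih hn' T (fun _ => hT (by omega))]
          simp
      · have hm' : xs.length ≤ n := by omega
        have hT' : T = [] := hT (by omega)
        subst hT'
        have ht1 : xs.take (n + 1) = xs := List.take_of_length_le (by omega)
        have ht2 : xs.take n = xs := List.take_of_length_le hm'
        rw [ht1, List.append_nil]
        by_cases hv : vmValid (PySem.List.pyGetD faces (n : Int) []) = true
        · rw [if_pos hv]
          have := ih hn' [] (fun _ => rfl)
          rw [ht2, List.append_nil] at this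
          rw [this]
        · rw [if_neg hv, if_neg (by exact_mod_cast not_lt.mpr hm')]
          have := ih hn' [] (fun _ => rfl)
          rw [ht2, List.append_nil] at this
          rw [this]

-- B's two step functions, one per component of the state
def vmStepL (faces : List (List Int)) (L : List (List (List Int))) (fid : Int) : List (List (List Int)) :=
  if (PySem.List.pyGetD faces fid []).length != (PySem.Set.ofList (PySem.List.pyGetD faces fid [])).length then
    L.map (fun pl => if fid < (pl.length : Int) then pl.eraseIdx fid.toNat else pl)
  else L

def vmStepF (faces : List (List Int)) (F : List (List Int)) (fid : Int) : List (List Int) :=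
  if (PySem.List.pyGetD faces fid []).length != (PySem.Set.ofList (PySem.List.pyGetD faces fid [])).length then
    F.eraseIdx fid.toNat
  else F

-- the faces component: the unguarded deletion agrees with the guarded one (erasing past the end is a no-op)
theorem vmStepF_foldl (faces : List (List Int)) :
    (PySem.List.pyRange ((faces.length : Int) - 1) (-1) (-1)).foldl (vmStepF faces) faces
      = vmKeep faces faces := by
  rw [PySem.List.foldl_congr_mem _ (vmStepF faces) (vmStep faces) faces ?h]
  case h =>
    intro acc fid hfid
    have h0 : (0 : Int) ≤ fid := by
      have := (PySem.List.mem_pyRange_neg_one.mp hfid).1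
      omega
    rw [vmStepF, vmStep]
    by_cases hb : ((PySem.List.pyGetD faces fid []).length == (PySem.Set.ofList (PySem.List.pyGetD faces fid [])).length) = true
    · have heq := eq_of_beq hb
      simp [heq]
    · simp only [Bool.not_eq_true] at hb
      simp only [bne, hb, Bool.not_false, if_pos]
      by_cases hg : fid < (acc.length : Int)
      · rw [if_pos hg]
      · rw [if_neg hg, List.eraseIdx_eq_self.mpr (by omega)]
  have := vmStep_foldl faces faces faces.length le_rfl [] (fun h => absurd h (by omega))
  rwa [List.take_length, List.append_nil, List.append_nil] at this

-- the parallel-lists component: the mapped step commutes with the fold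
theorem vmStepL_foldl (faces : List (List Int)) (rng : List Int) :
    ∀ (L0 : List (List (List Int))),
      rng.foldl (vmStepL faces) L0 = L0.map (fun pl => rng.foldl (vmStep faces) pl) := by
  induction rng with
  | nil => intro L0; simp
  | cons fid rng ih =>
      intro L0
      rw [List.foldl_cons, ih]
      have hstep : vmStepL faces L0 fid = L0.map (fun pl => vmStep faces pl fid) := by
        rw [vmStepL]
        by_cases hb : ((PySem.List.pyGetD faces fid []).length != (PySem.Set.ofList (PySem.List.pyGetD faces fid [])).length) = true
        · rw [if_pos hb]
          apply List.map_congr_left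
          intro pl _
          rw [vmStep, if_pos hb]
        · rw [if_neg hb]
          have : ∀ pl ∈ L0, vmStep faces pl fid = id pl := by
            intro pl _
            rw [vmStep, if_neg hb]; rfl
          rw [List.map_congr_left this, List.map_id]
      rw [hstep, List.map_map]
      rfl

-- ---- bridge between the two closed forms ----
theorem vmFaces_eq_vmKeep (faces : List (List Int)) :
    vmFaces faces 0 = vmKeep faces faces := by
  simp [vmFaces, vmKeep, PySem.List.enumerate_eq_map_pyRange faces ([] : List Int),
    PySem.List.pyRange_zero_nat, List.filter_map, List.map_map, Function.comp_def,
    PySem.List.pyGetD_natCast, List.getD_eq_getElem?_getD]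

-- (range N).filter (p · && · < m) drops the bound into the range
theorem vmFilterRange (m N : Nat) (p : Nat → Bool) :
    (List.range N).filter (fun i => p i && decide (i < m))
      = (List.range (min N m)).filter p := by
  induction N with
  | zero => simp
  | succ N ihN =>
      rw [List.range_succ, List.filter_append, ihN]
      by_cases h : N < m
      · have h1 : min N m = N := by omega
        have h2 : min (N + 1) m = N + 1 := by omega
        rw [h1, h2, List.range_succ, List.filter_append]
        have hd : decide (N < m) = true := decide_eq_true h
        simp [List.filter_singleton, hd]
      · have h1 : min (N + 1) m = min N m := by omega
        rw [h1]
        simp [h]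

theorem vmContrib_eq_vmKeep (faces : List (List Int)) (fl : List (List Int)) :
    vmContrib faces 0 fl = vmKeep faces (fl.take faces.length) := by
  have hlen : (fl.take faces.length).length = min faces.length fl.length := by
    simp [List.length_take]
  have hids : ((PySem.List.enumerate faces 0).filter (fun p => vmValid p.2)).map Prod.fst
      = ((List.range faces.length).filter
            (fun i : Nat => vmValid (PySem.List.pyGetD faces (i : Int) []))).map (fun i : Nat => (i : Int)) := by
    simp [PySem.List.enumerate_eq_map_pyRange faces ([] : List Int), PySem.List.pyRange_zero_nat,
      List.filter_map, List.map_map, Function.comp_def]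
  rw [vmContrib, hids, List.filter_map, List.map_map]
  have hp : ((fun fid : Int => decide (fid < (fl.length : Int))) ∘ (fun i : Nat => (i : Int)))
      = fun i : Nat => decide (i < fl.length) := by
    funext i; simp
  rw [hp, List.filter_filter]
  have hfc : (List.range faces.length).filter
        (fun a : Nat => decide (a < fl.length) && vmValid (PySem.List.pyGetD faces (a : Int) []))
      = (List.range faces.length).filter
        (fun a : Nat => vmValid (PySem.List.pyGetD faces (a : Int) []) && decide (a < fl.length)) := by
    apply List.filter_congr
    intro a _
    rw [Bool.and_comm]
  rw [hfc, vmFilterRange fl.length faces.length (fun i : Nat => vmValid (PySem.List.pyGetD faces (i : Int) []))]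
  rw [vmKeep, hlen]
  apply List.map_congr_left
  intro i hi
  have hi1 : i < min faces.length fl.length := List.mem_range.mp (List.mem_of_mem_filter hi)
  simp [PySem.List.pyGetD_natCast, List.getD_eq_getElem?_getD,
    List.getElem?_take_of_lt (show i < faces.length by omega)]

-- B's fold splits into independent per-component folds
theorem vm_alt_closed (face_lists : List (List (List Int))) (faces : List (List Int)) :
    validate_mesh_py_alt face_lists faces
      = (face_lists.map (fun fl => vmKeep faces (fl.take faces.length)), vmKeep faces faces) := by
  unfold validate_mesh_py_alt
  rw [PySem.List.foldl_congr_mem _ _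
      (fun (st : List (List (List Int)) × List (List Int)) fid => (vmStepL faces st.1 fid, vmStepF faces st.2 fid)) _ ?hc]
  case hc =>
    intro st fid _
    simp only [vmStepL, vmStepF]
    by_cases hb : ((PySem.List.pyGetD faces fid []).length != (PySem.Set.ofList (PySem.List.pyGetD faces fid [])).length) = true
    · simp [hb]
    · simp [hb]
  rw [PySem.List.foldl_prod_mk, vmStepL_foldl, vmStepF_foldl, List.map_map]
  refine congrArg (fun x => (x, vmKeep faces faces)) ?_
  apply List.map_congr_left
  intro fl _
  have hslice : PySem.List.slice fl none (some (faces.length : Int)) = fl.take faces.length :=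
    PySem.List.slice_to_natCast fl faces.length
  simp only [Function.comp, hslice]
  have := vmStep_foldl faces (fl.take faces.length) faces.length le_rfl [] (fun _ => rfl)
  rwa [List.take_take, Nat.min_self , List.append_nil, List.append_nil] at this

-- ===== VERDICT (by name: the statement is the Claim_ definition above) =====
theorem validate_mesh_py_spec : Claim_equal_validate_mesh_py := by
  intro face_lists faces _
  show validate_mesh_py face_lists faces = validate_mesh_py_alt face_lists faces
  rw [validate_mesh_py, vmFoldl face_lists faces 0 _ _ (by simp), vm_alt_closed]
  simp only [Prod.mk.injEq]
  refine ⟨?_, ?_⟩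
  · apply List.ext_getElem
    · simp
    · intro i h1 h2
      have hi2 : i < face_lists.length := by
        simp only [List.length_map] at h2; omega
      simp only [List.getElem_map, List.getElem_zip, List.nil_append]
      exact vmContrib_eq_vmKeep faces _
  · simpa using vmFaces_eq_vmKeep faces
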